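-- pv_equiv track=rewrite | github.com/MuhammadNafayKhan/Dissertation | app/streamlit_app.py | choose_best_model
-- ===== SOURCE A (Python) =====
-- from typing import List, Dict, Optional, Tuple
--
-- def choose_best_model(models: List[Dict]) -> Dict:
--     order = [
--         ("keras", "LSTM"),
--         ("sklearn", "GBR"),
--         ("sklearn", "SVR"),
--         ("keras", "TCN"),
--     ]
--     for t, name in order:
--         for m in models:
--             if m.get("type") == t and m.get("name") == name:
--                 return m
--     return models[0] if models else {}
-- ===== SOURCE B (Python) =====
-- def choose_best_model(models):
--     lstm = gbr = svr = tcn = None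
--     for m in models:
--         t, n = m.get("type"), m.get("name")
--         if lstm is None and t == "keras" and n == "LSTM":
--             lstm = m
--         if gbr is None and t == "sklearn" and n == "GBR":
--             gbr = m
--         if svr is None and t == "sklearn" and n == "SVR":
--             svr = m
--         if tcn is None and t == "keras" and n == "TCN":
--             tcn = m
--     for cand in (lstm, gbr, svr, tcn):
--         if cand is not None:
--             return cand
--     return models[0] if models else {}
-- ===== Notes on version B (the rewrite author's own statement) =====
-- stated objective: alternative
-- what changed: Inverts the loop nesting: instead of rescanning all models for each preference key, B makes a single pass over models maintaining four first-match accumulators (one per preference key) and then selects the first non-empty accumulator in preference order.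
import Mathlib
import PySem

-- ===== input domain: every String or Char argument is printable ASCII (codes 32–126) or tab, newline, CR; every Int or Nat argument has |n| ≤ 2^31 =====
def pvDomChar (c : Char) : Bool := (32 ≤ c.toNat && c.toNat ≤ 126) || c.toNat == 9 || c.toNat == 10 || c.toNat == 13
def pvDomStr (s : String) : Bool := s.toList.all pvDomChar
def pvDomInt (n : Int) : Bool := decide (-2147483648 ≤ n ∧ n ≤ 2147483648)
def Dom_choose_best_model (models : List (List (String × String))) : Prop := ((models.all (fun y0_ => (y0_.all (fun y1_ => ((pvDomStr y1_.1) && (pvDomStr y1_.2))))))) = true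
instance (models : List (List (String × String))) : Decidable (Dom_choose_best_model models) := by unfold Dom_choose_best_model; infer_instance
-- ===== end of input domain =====

-- B inverts A's loop nesting: one pass over models with four first-match accumulators, then a constant-time selection.

-- ===== PORT A =====
-- m.get(k) on a model dict (assoc list, first match wins)
def cbmGet (m : List (String × String)) (k : String) : Option String :=
  (PySem.Dict.mk m).get? k

-- A's inner loop: 'for m in models: if m.get("type") == t and m.get("name") == name: return m'
def cbmInner (t n : String) : List (List (String × String)) → Option (List (String × String))
  | [] => none
  | m :: rest =>
      if cbmGet m "type" = some t ∧ cbmGet m "name" = some n then some m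
      else cbmInner t n rest

-- A's outer loop over the order list
def cbmOuter (models : List (List (String × String))) :
    List (String × String) → Option (List (String × String))
  | [] => none
  | (t, n) :: rest =>
      match cbmInner t n models with
      | some m => some m
      | none => cbmOuter models rest

def choose_best_model (models : List (List (String × String))) : List (String × String) :=
  match cbmOuter models [("keras", "LSTM"), ("sklearn", "GBR"), ("sklearn", "SVR"), ("keras", "TCN")] with
  | some m => m
  | none => match models with
            | [] => []
            | m :: _ => m

-- ===== PORT B =====
-- B's loop body: update the four first-match slots (each keeps its first hit)
def cbmStep
    (acc : Option (List (String × String)) × Option (List (String × String)) ×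
           Option (List (String × String)) × Option (List (String × String)))
    (m : List (String × String)) :
    Option (List (String × String)) × Option (List (String × String)) ×
    Option (List (String × String)) × Option (List (String × String)) :=
  let t := (PySem.Dict.mk m).get? "type"
  let n := (PySem.Dict.mk m).get? "name"
  (if acc.1 = none ∧ t = some "keras" ∧ n = some "LSTM" then some m else acc.1,
   if acc.2.1 = none ∧ t = some "sklearn" ∧ n = some "GBR" then some m else acc.2.1,
   if acc.2.2.1 = none ∧ t = some "sklearn" ∧ n = some "SVR" then some m else acc.2.2.1,
   if acc.2.2.2 = none ∧ t = some "keras" ∧ n = some "TCN" then some m else acc.2.2.2)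

def choose_best_model_alt (models : List (List (String × String))) : List (String × String) :=
  let r := models.foldl cbmStep (none, none, none, none)
  -- 'for cand in (lstm, gbr, svr, tcn): if cand is not None: return cand'
  match ((r.1.or r.2.1).or r.2.2.1).or r.2.2.2 with
  | some m => m
  | none => match models with
            | [] => []
            | m :: _ => m

-- ===== PRECONDITION & SPEC =====
def Spec_choose_best_model (models : List (List (String × String))) (out : List (String × String)) : Prop := out = choose_best_model_alt models
instance (models : List (List (String × String))) (out : List (String × String)) : Decidable (Spec_choose_best_model models out) := by unfold Spec_choose_best_model; infer_instance

-- ===== CLAIM (what is proved, stated in full; the proofs are below) =====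
def Claim_equal_choose_best_model : Prop := ∀ (models : List (List (String × String))), Dom_choose_best_model models → Spec_choose_best_model models (choose_best_model models)

-- ===== LEMMAS AND PROOFS =====

-- each accumulator slot computes 'initial slot .or first match in models'
theorem foldl_cbmStep (models : List (List (String × String)))
    (acc : Option (List (String × String)) × Option (List (String × String)) ×
           Option (List (String × String)) × Option (List (String × String))) :
    models.foldl cbmStep acc =
      (acc.1.or (cbmInner "keras" "LSTM" models),
       acc.2.1.or (cbmInner "sklearn" "GBR" models),
       acc.2.2.1.or (cbmInner "sklearn" "SVR" models),
       acc.2.2.2.or (cbmInner "keras" "TCN" models)) := by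
  induction models generalizing acc with
  | nil => simp [cbmInner]
  | cons m rest ih =>
      obtain ⟨a, b, c, d⟩ := acc
      simp only [List.foldl_cons, ih, cbmInner, cbmStep, cbmGet]
      refine Prod.ext ?_ (Prod.ext ?_ (Prod.ext ?_ ?_)) <;>
        · cases a <;> cases b <;> cases c <;> cases d <;> simp <;> split_ifs <;> simp_all

-- ===== VERDICT (by name: the statement is the Claim_ definition above) =====
theorem choose_best_model_spec : Claim_equal_choose_best_model := by
  intro models _
  unfold Spec_choose_best_model choose_best_model choose_best_model_alt
  rw [foldl_cbmStep]
  simp only [cbmOuter, Option.none_or]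
  cases cbmInner "keras" "LSTM" models <;>
    cases cbmInner "sklearn" "GBR" models <;>
      cases cbmInner "sklearn" "SVR" models <;>
        cases cbmInner "keras" "TCN" models <;> rfl
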